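-- pv_equiv track=rewrite | github.com/SravyaSajja88/secure-opt-passes | secure-opt-passes/src/feature_extractor.py | _estimate_loops
-- ===== SOURCE A (Python) =====
-- def _estimate_loops(ir: str) -> int:
--     """Estimate number of loops (heuristic: back edges in CFG)"""
--     # Simple heuristic: count branches to earlier labels
--     # This is approximate but sufficient for features
--     lines = ir.split('\n')
--     labels = set()
--     branches_back = 0
--
--     for line in lines:
--         line = line.strip()
--         # Track labels
--         if line.endswith(':') and not line.startswith(';'):
--             label = line[:-1].strip()
--             labels.add(label)
--         # Check branches
--         if 'br ' in line:
--             # Extract label names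
--             parts = line.split()
--             for part in parts:
--                 if part.startswith('%') and part.rstrip(',') in labels:
--                     branches_back += 1
--
--     return branches_back // 2  # Approximate (back edges counted multiple times)
-- ===== SOURCE B (Python) =====
-- def _estimate_loops(ir: str) -> int:
--     """Estimate number of loops (heuristic: back edges in CFG)"""
--     lines = [l.strip() for l in ir.split('\n')]
--     # First pass: first defining line index of each label.
--     first_def = {}
--     for i, line in enumerate(lines):
--         if line.endswith(':') and not line.startswith(';'):
--             first_def.setdefault(line[:-1].strip(), i)
--     # Second pass: count branch operands naming an already-defined label.
--     total = sum(
--         1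
--         for i, line in enumerate(lines)
--         if 'br ' in line
--         for part in line.split()
--         if part.startswith('%') and first_def.get(part.rstrip(','), i + 1) <= i
--     )
--     return total // 2
-- ===== Notes on version B (the rewrite author's own statement) =====
-- stated objective: alternative
-- what changed: Replaces the single pass with a progressively-grown label set by two passes: first a dict from each label to its first defining line index, then a comprehension-sum over enumerated lines counting branch operands whose first definition index is <= the current line.
import Mathlib
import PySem

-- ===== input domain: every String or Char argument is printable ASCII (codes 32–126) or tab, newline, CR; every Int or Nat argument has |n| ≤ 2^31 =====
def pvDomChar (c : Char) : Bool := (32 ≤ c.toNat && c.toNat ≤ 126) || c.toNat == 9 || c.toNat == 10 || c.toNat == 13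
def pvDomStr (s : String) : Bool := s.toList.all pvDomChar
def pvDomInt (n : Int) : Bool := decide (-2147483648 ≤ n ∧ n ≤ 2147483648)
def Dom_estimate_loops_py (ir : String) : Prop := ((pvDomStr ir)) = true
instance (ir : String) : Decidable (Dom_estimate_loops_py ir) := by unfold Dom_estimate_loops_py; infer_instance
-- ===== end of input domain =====

-- B replaces A's single pass with a progressively-grown label set by two passes (a
-- first-definition-index dict, then a counting pass over enumerated lines); same
-- return value, no speed claim (objective: alternative).

-- ===== PORT A =====
-- shared primitive: exact port of str.rstrip(',') (PySem has no rstrip-with-chars)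
def pyRstripComma (cs : List Char) : List Char := (cs.reverse.dropWhile (· == ',')).reverse

-- line.endswith(':') and not line.startswith(';')
def pvIsLabelLine (l : List Char) : Bool :=
  PySem.Chars.endswith l [':'] && !(PySem.Chars.startswith l [';'])

-- line[:-1].strip()
def pvLabelOf (l : List Char) : List Char :=
  PySem.Chars.strip (PySem.List.slice l none (some (-1)))

def estimate_loops_py (ir : String) : Int :=
  let lines := PySem.Chars.splitOn ir.toList ['\n']
  let st := lines.foldl
    (fun (st : PySem.Set (List Char) × Int) rawLine =>
      let line := PySem.Chars.strip rawLine
      let labels :=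
        if pvIsLabelLine line then PySem.Set.add st.1 (pvLabelOf line) else st.1
      let bb :=
        if PySem.Chars.isIn ['b', 'r', ' '] line then
          (PySem.Chars.split₀ line).foldl
            (fun acc part =>
              if PySem.Chars.startswith part ['%'] &&
                  PySem.Set.contains labels (pyRstripComma part)
              then acc + 1 else acc) st.2
        else st.2
      (labels, bb))
    (PySem.Set.empty, 0)
  PySem.Int.floordiv st.2 2

-- ===== PORT B =====
def estimate_loops_py_alt (ir : String) : Int :=
  let lines := (PySem.Chars.splitOn ir.toList ['\n']).map PySem.Chars.strip
  let firstDef := (PySem.List.enumerate lines 0).foldl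
    (fun (d : PySem.Dict (List Char) Int) p =>
      if pvIsLabelLine p.2 then PySem.Dict.setdefault d (pvLabelOf p.2) p.1 else d)
    PySem.Dict.empty
  let total := (PySem.List.enumerate lines 0).foldl
    (fun (acc : Int) p =>
      if PySem.Chars.isIn ['b', 'r', ' '] p.2 then
        (PySem.Chars.split₀ p.2).foldl
          (fun a part =>
            if PySem.Chars.startswith part ['%'] &&
                decide (PySem.Dict.getD firstDef (pyRstripComma part) (p.1 + 1) ≤ p.1)
            then a + 1 else a) acc
      else acc)
    0
  PySem.Int.floordiv total 2

-- ===== PRECONDITION & SPEC =====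
def Spec_estimate_loops_py (ir : String) (out : Int) : Prop := out = estimate_loops_py_alt ir
instance (ir : String) (out : Int) : Decidable (Spec_estimate_loops_py ir out) := by unfold Spec_estimate_loops_py; infer_instance

-- ===== CLAIM (what is proved, stated in full; the proofs are below) =====
def Claim_equal_estimate_loops_py : Prop := ∀ (ir : String), Dom_estimate_loops_py ir → Spec_estimate_loops_py ir (estimate_loops_py ir)

-- ===== LEMMAS AND PROOFS =====

-- A's per-line set update
def pvSetStep (s : PySem.Set (List Char)) (l : List Char) : PySem.Set (List Char) :=
  if pvIsLabelLine l then PySem.Set.add s (pvLabelOf l) else s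

-- A's label set after the first k (stripped) lines
def pvSetAfter (L : List (List Char)) (k : Nat) : PySem.Set (List Char) :=
  (L.take k).foldl pvSetStep PySem.Set.empty

-- the predicate B's dict search uses
def pvDefines (lab : List Char) (l : List Char) : Bool := pvIsLabelLine l && pvLabelOf l == lab

-- B's dict-building step
def pvDictStep (d : PySem.Dict (List Char) Int) (p : Int × List Char) : PySem.Dict (List Char) Int :=
  if pvIsLabelLine p.2 then PySem.Dict.setdefault d (pvLabelOf p.2) p.1 else d

lemma pv_mem_foldl_setStep (P : List (List Char)) (s : PySem.Set (List Char)) (lab : List Char) :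
    lab ∈ P.foldl pvSetStep s ↔ lab ∈ s ∨ ∃ l ∈ P, pvDefines lab l := by
  induction P generalizing s with
  | nil => simp
  | cons l P ih =>
    simp only [List.foldl_cons, ih, List.mem_cons, pvSetStep, pvDefines]
    by_cases h : pvIsLabelLine l = true
    · simp [h, PySem.Set.mem_add, beq_iff_eq]
      tauto
    · simp [h]

lemma pv_setAfter_contains (L : List (List Char)) (k : Nat) (lab : List Char) :
    PySem.Set.contains (pvSetAfter L k) lab = true ↔
      ∃ j, j < k ∧ ∃ h : j < L.length, pvDefines lab L[j] = true := by
  rw [PySem.Set.contains_iff, pvSetAfter, pv_mem_foldl_setStep]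
  constructor
  · rintro (h | ⟨l, hl, hd⟩)
    · simp [PySem.Set.empty] at h
    · obtain ⟨j, hj, hget⟩ := List.mem_iff_getElem.mp hl
      have hjk : j < k := by simpa using lt_of_lt_of_le hj (by simp)
      have hlen : j < L.length := by simp at hj; omega
      refine ⟨j, hjk, hlen, ?_⟩
      rw [← hget] at hd
      simpa [List.getElem_take] using hd
  · rintro ⟨j, hjk, hlen, hd⟩
    refine Or.inr ⟨L[j], ?_, hd⟩
    have : (L.take k)[j]'(by simp; omega) = L[j] := by simp [List.getElem_take]
    exact this ▸ List.getElem_mem _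

-- dict characterisation: get? on the built dict is the first defining index
lemma pv_get?_buildDict (L : List (List Char)) (n : Int) (d0 : PySem.Dict (List Char) Int)
    (lab : List Char) :
    ((PySem.List.enumerate L n).foldl pvDictStep d0).get? lab =
      match d0.get? lab with
      | some v => some v
      | none => (List.findIdx? (pvDefines lab) L).map (fun j => n + (j : Int)) := by
  induction L generalizing n d0 with
  | nil => cases h : d0.get? lab <;> simp [PySem.List.enumerate, h]
  | cons l L ih =>
    rw [PySem.List.enumerate_cons, List.foldl_cons, ih]
    by_cases hlab : pvIsLabelLine l = true
    · by_cases heq : pvLabelOf l = lab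
      · have hdef : pvDefines lab l = true := by simp [pvDefines, hlab, heq]
        cases h : d0.get? lab with
        | some v =>
          have : (pvDictStep d0 (n, l)).get? lab = some v := by
            simp only [pvDictStep, hlab, if_true, heq]
            rw [PySem.Dict.get?_setdefault_self, h]; rfl
          simp [this]
        | none =>
          have : (pvDictStep d0 (n, l)).get? lab = some n := by
            simp only [pvDictStep, hlab, if_true, heq]
            rw [PySem.Dict.get?_setdefault_self, h]; rfl
          simp [this, List.findIdx?_cons, hdef]
      · have hdef : pvDefines lab l = false := by simp [pvDefines, heq]
        have hget : (pvDictStep d0 (n, l)).get? lab = d0.get? lab := by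
          simp only [pvDictStep, hlab, if_true]
          exact PySem.Dict.get?_setdefault_of_ne d0 n (Ne.symm heq)
        rw [hget]
        cases h : d0.get? lab with
        | some v => simp
        | none =>
          simp only [List.findIdx?_cons, hdef]
          cases hf : List.findIdx? (pvDefines lab) L <;> simp
          ring
    · have hdef : pvDefines lab l = false := by simp [pvDefines, hlab]
      have hget : pvDictStep d0 (n, l) = d0 := by simp [pvDictStep, hlab]
      rw [hget]
      cases h : d0.get? lab with
      | some v => simp
      | none =>
        simp only [List.findIdx?_cons, hdef]
        cases hf : List.findIdx? (pvDefines lab) L <;> simp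
        ring

lemma pv_guard_iff (L : List (List Char)) (k : Nat) (_hk : k < L.length) (lab : List Char) :
    (PySem.Dict.getD ((PySem.List.enumerate L 0).foldl pvDictStep PySem.Dict.empty) lab ((k : Int) + 1) ≤ (k : Int)) ↔
      ∃ j, j < k + 1 ∧ ∃ h : j < L.length, pvDefines lab L[j] = true := by
  rw [PySem.Dict.getD_eq_get?_getD, pv_get?_buildDict]
  simp only [PySem.Dict.get?_empty]
  cases hf : List.findIdx? (pvDefines lab) L with
  | none =>
    show ((k : Int) + 1 ≤ (k : Int)) ↔ _
    rw [List.findIdx?_eq_none_iff] at hf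
    constructor
    · intro h; omega
    · rintro ⟨j, _, hj, hd⟩
      exact absurd (hf _ (List.getElem_mem hj)) (by simp [hd])
  | some i =>
    obtain ⟨hi, hpi, hmin⟩ := List.findIdx?_eq_some_iff_getElem.mp hf
    show (0 + (i : Int) ≤ (k : Int)) ↔ _
    rw [zero_add]
    constructor
    · intro h
      refine ⟨i, ?_, hi, hpi⟩
      have h' : (i : Int) ≤ (k : Int) := h
      omega
    · rintro ⟨j, hjk, hj, hd⟩
      have hij : i ≤ j := by
        by_contra hlt
        exact (hmin j (by omega)) hd
      have h1 : (i : Int) ≤ (j : Int) := by exact_mod_cast hij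
      have h2 : (j : Int) < (k : Int) + 1 := by exact_mod_cast hjk
      omega

-- A's per-line pair step (set update, then branch-operand count against the UPDATED set)
def pvCountA (s : PySem.Set (List Char)) (line : List Char) (acc : Int) : Int :=
  if PySem.Chars.isIn ['b', 'r', ' '] line then
    (PySem.Chars.split₀ line).foldl
      (fun a part =>
        if PySem.Chars.startswith part ['%'] && PySem.Set.contains s (pyRstripComma part)
        then a + 1 else a) acc
  else acc

def pvAStep (st : PySem.Set (List Char) × Int) (line : List Char) : PySem.Set (List Char) × Int :=
  (pvSetStep st.1 line, pvCountA (pvSetStep st.1 line) line st.2)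

-- B's per-line counting step against the prebuilt dict
def pvBStep (d : PySem.Dict (List Char) Int) (acc : Int) (p : Int × List Char) : Int :=
  if PySem.Chars.isIn ['b', 'r', ' '] p.2 then
    (PySem.Chars.split₀ p.2).foldl
      (fun a part =>
        if PySem.Chars.startswith part ['%'] &&
            decide (PySem.Dict.getD d (pyRstripComma part) (p.1 + 1) ≤ p.1)
        then a + 1 else a) acc
  else acc

lemma pv_setAfter_succ (L : List (List Char)) (k : Nat) (hk : k < L.length) :
    pvSetAfter L (k + 1) = pvSetStep (pvSetAfter L k) (L[k]'hk) := by
  have h : L.take (k + 1) = L.take k ++ [L[k]'hk] := by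
    rw [List.take_add_one, List.getElem?_eq_getElem hk]
    rfl
  unfold pvSetAfter
  rw [h, List.foldl_append]
  rfl

lemma pv_pass2 (L : List (List Char))
    (suf : List (List Char)) (k : Nat) (hk : L.drop k = suf) (acc : Int) :
    (suf.foldl pvAStep (pvSetAfter L k, acc)).2 =
      (PySem.List.enumerate suf (k : Int)).foldl
        (pvBStep ((PySem.List.enumerate L 0).foldl pvDictStep PySem.Dict.empty)) acc := by
  induction suf generalizing k acc with
  | nil => simp [PySem.List.enumerate]
  | cons l rest ih =>
    have hklen : k < L.length := by
      by_contra h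
      rw [List.drop_eq_nil_of_le (by omega)] at hk
      exact List.cons_ne_nil l rest hk.symm
    have hcons := List.drop_eq_getElem_cons hklen
    rw [hk] at hcons
    have hLk : L[k]'hklen = l := (List.cons.injEq .. ▸ hcons.symm).1
    have hrest : L.drop (k + 1) = rest := (List.cons.injEq .. ▸ hcons.symm).2
    rw [List.foldl_cons, PySem.List.enumerate_cons, List.foldl_cons]
    have hset : pvSetStep (pvSetAfter L k) l = pvSetAfter L (k + 1) := by
      rw [pv_setAfter_succ L k hklen, hLk]
    have hcount : pvCountA (pvSetAfter L (k + 1)) l acc =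
        pvBStep ((PySem.List.enumerate L 0).foldl pvDictStep PySem.Dict.empty) acc ((k : Int), l) := by
      unfold pvCountA pvBStep
      by_cases hbr : PySem.Chars.isIn ['b', 'r', ' '] l = true
      · simp only [hbr, if_true]
        refine PySem.List.foldl_congr_mem _ _ _ _ ?_
        intro a part _
        have hb : PySem.Set.contains (pvSetAfter L (k + 1)) (pyRstripComma part) =
            decide (PySem.Dict.getD
              ((PySem.List.enumerate L 0).foldl pvDictStep PySem.Dict.empty)
              (pyRstripComma part) ((k : Int) + 1) ≤ (k : Int)) := by
          rw [Bool.eq_iff_iff, decide_eq_true_eq, pv_setAfter_contains,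
            pv_guard_iff L k hklen]
        rw [hb]
      · simp [hbr]
    show (rest.foldl pvAStep
        (pvSetStep (pvSetAfter L k) l, pvCountA (pvSetStep (pvSetAfter L k) l) l acc)).2 = _
    rw [hset, hcount]
    have := ih (k + 1) hrest
      (pvBStep ((PySem.List.enumerate L 0).foldl pvDictStep PySem.Dict.empty) acc ((k : Int), l))
    rw [this]
    norm_num

theorem pv_main (ir : String) : estimate_loops_py ir = estimate_loops_py_alt ir := by
  show PySem.Int.floordiv
      ((List.foldl (fun st raw => pvAStep st (PySem.Chars.strip raw))
        (PySem.Set.empty, 0) (PySem.Chars.splitOn ir.toList ['\n'])).2) 2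
    = PySem.Int.floordiv
      ((PySem.List.enumerate ((PySem.Chars.splitOn ir.toList ['\n']).map PySem.Chars.strip) 0).foldl
        (pvBStep ((PySem.List.enumerate ((PySem.Chars.splitOn ir.toList ['\n']).map PySem.Chars.strip) 0).foldl
          pvDictStep PySem.Dict.empty)) 0) 2
  rw [← List.foldl_map (f := PySem.Chars.strip) (g := pvAStep)]
  congr 1
  have h := pv_pass2 ((PySem.Chars.splitOn ir.toList ['\n']).map PySem.Chars.strip)
    ((PySem.Chars.splitOn ir.toList ['\n']).map PySem.Chars.strip) 0 (by simp) 0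
  simpa [pvSetAfter] using h

-- ===== VERDICT (by name: the statement is the Claim_ definition above) =====
theorem estimate_loops_py_spec : Claim_equal_estimate_loops_py := by
  intro ir _
  unfold Spec_estimate_loops_py
  exact pv_main ir
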